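-- pv_equiv track=rewrite | github.com/ARLbenjamin/PythonGames | panecillos.py | obtenerPista
-- ===== SOURCE A (Python) =====
-- def obtenerPista(conjetura, numSecreto):
--     #regresa una palabra clave a manera de pista
--
--     if conjetura == numSecreto:
--         return 'Lo has adivinado!!'
--
--     pista = []
--
--     for i in range(len(conjetura)):
--         if conjetura[i] == numSecreto[i]:
--             pista.append('Fermi')
--         elif conjetura[i] in numSecreto:
--             pista.append('Pico')
--     if len(pista) == 0:
--         return 'Panecillos'
--
--     pista.sort()
--     return ' '.join(pista)
-- ===== SOURCE B (Python) =====
-- def obtenerPista(conjetura, numSecreto):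
--     # two staged comprehension passes; pico derived arithmetically, no per-position branching
--     if conjetura == numSecreto:
--         return 'Lo has adivinado!!'
--     fermi = sum(a == b for a, b in zip(conjetura, numSecreto))
--     enSecreto = sum(a in numSecreto for a in conjetura)
--     if enSecreto == 0:
--         return 'Panecillos'
--     pico = enSecreto - fermi
--     return ' '.join(['Fermi'] * fermi + ['Pico'] * pico)
-- ===== Notes on version B (the rewrite author's own statement) =====
-- stated objective: simpler
-- what changed: B has no per-position if/elif loop and no sort: it makes two staged passes - sum of positional matches over zip(conjetura, numSecreto) and a membership-count sum over conjetura - and derives pico arithmetically as the difference (every Fermi position is also a membership hit), assembling the answer directly as replicated labels.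
import Mathlib
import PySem

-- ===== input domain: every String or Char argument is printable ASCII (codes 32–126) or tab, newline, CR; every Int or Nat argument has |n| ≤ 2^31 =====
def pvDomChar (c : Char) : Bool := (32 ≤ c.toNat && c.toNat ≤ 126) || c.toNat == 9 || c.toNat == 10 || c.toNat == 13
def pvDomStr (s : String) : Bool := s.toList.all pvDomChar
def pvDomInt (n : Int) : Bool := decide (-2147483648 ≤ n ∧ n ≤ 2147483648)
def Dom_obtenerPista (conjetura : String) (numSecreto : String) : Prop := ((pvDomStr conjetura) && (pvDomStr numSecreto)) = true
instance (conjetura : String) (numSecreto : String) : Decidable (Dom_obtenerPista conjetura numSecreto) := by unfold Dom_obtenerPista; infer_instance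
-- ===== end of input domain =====

-- B replaces A's per-position if/elif loop + sort by two staged comprehension sums
-- (positional matches over zip, membership hits over the guess) and derives pico
-- arithmetically as their difference (objective: simpler).

-- ===== PORT A =====
-- one loop step of A: append 'Fermi' / 'Pico' / nothing for index i
-- ('conjetura[i] in numSecreto' on a single character is exactly list membership)
def pvStepA (cl sl : List Char) (acc : List String) (i : Int) : List String :=
  match PySem.List.pyGet? cl i, PySem.List.pyGet? sl i with
  | some a, some b =>
      if a == b then acc ++ ["Fermi"]
      else if sl.contains a then acc ++ ["Pico"]
      else acc
  | _, _ => acc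

def obtenerPista (conjetura : String) (numSecreto : String) : String :=
  if conjetura == numSecreto then "Lo has adivinado!!"
  else
    let cl := conjetura.toList
    let sl := numSecreto.toList
    let pista := (PySem.List.pyRange 0 (cl.length : Int) 1).foldl (pvStepA cl sl) []
    if pista.length == 0 then "Panecillos"
    else PySem.Str.join " " (PySem.List.sorted pista (fun x => x) false)

-- ===== PORT B =====
def obtenerPista_alt (conjetura : String) (numSecreto : String) : String :=
  if conjetura == numSecreto then "Lo has adivinado!!"
  else
    let cl := conjetura.toList
    let sl := numSecreto.toList
    -- sum(a == b for a, b in zip(conjetura, numSecreto))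
    let fermi : Int := ((cl.zip sl).map (fun p => if p.1 == p.2 then (1 : Int) else 0)).sum
    -- sum(a in numSecreto for a in conjetura); 'a in numSecreto' on one char is list membership
    let enSecreto : Int := (cl.map (fun a => if sl.contains a then (1 : Int) else 0)).sum
    if enSecreto == 0 then "Panecillos"
    else
      let pico := enSecreto - fermi
      PySem.Str.join " " (PySem.List.pyRepeat ["Fermi"] fermi ++ PySem.List.pyRepeat ["Pico"] pico)

-- ===== PRECONDITION & SPEC =====
-- Pre_ excludes exactly the inputs where Python A raises IndexError:
-- conjetura longer than numSecreto (and not equal), where numSecreto[i] is out of range.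
def Pre_obtenerPista (conjetura : String) (numSecreto : String) : Prop :=
  conjetura = numSecreto ∨ conjetura.toList.length ≤ numSecreto.toList.length
instance (conjetura : String) (numSecreto : String) : Decidable (Pre_obtenerPista conjetura numSecreto) := by unfold Pre_obtenerPista; infer_instance
def pvWitness_obtenerPista : String × String := ("12", "13")

def Spec_obtenerPista (conjetura : String) (numSecreto : String) (out : String) : Prop := out = obtenerPista_alt conjetura numSecreto
instance (conjetura : String) (numSecreto : String) (out : String) : Decidable (Spec_obtenerPista conjetura numSecreto out) := by unfold Spec_obtenerPista; infer_instance

-- ===== CLAIM (what is proved, stated in full; the proofs are below) =====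
def Claim_equal_obtenerPista : Prop := ∀ (conjetura : String) (numSecreto : String), Dom_obtenerPista conjetura numSecreto → Pre_obtenerPista conjetura numSecreto → Spec_obtenerPista conjetura numSecreto (obtenerPista conjetura numSecreto)

-- ===== LEMMAS AND PROOFS =====

-- the labels one position (a pair of the zipped strings) contributes in A
def pvF (sl : List Char) (p : Char × Char) : List String :=
  if p.1 == p.2 then ["Fermi"] else if sl.contains p.1 then ["Pico"] else []

theorem pv_le_FP : ("Fermi" : String) ≤ "Pico" := by
  rw [String.le_iff_toList_le]; decide

-- A's index fold builds exactly the concatenation of per-pair labels over the zip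
theorem pv_flat (cl sl : List Char) :
    ∀ (n : Nat) (acc : List String), n ≤ cl.length → n ≤ sl.length →
      (PySem.List.pyRange 0 (n : Int) 1).foldl (pvStepA cl sl) acc
        = acc ++ ((cl.zip sl).take n).flatMap (pvF sl) := by
  intro n
  induction n with
  | zero => intro acc _ _; simp [PySem.List.pyRange]
  | succ n ih =>
    intro acc hc hs
    have hb : (((n + 1 : Nat)) : Int) = (n : Int) + 1 := by push_cast; ring
    rw [hb, PySem.List.pyRange_one_succ_right (by positivity), List.foldl_append,
      ih acc (by omega) (by omega)]
    have hcn : n < cl.length := by omega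
    have hsn : n < sl.length := by omega
    have hzn : n < (cl.zip sl).length := by simp [List.length_zip]; omega
    have hz : (cl.zip sl).take (n + 1)
        = (cl.zip sl).take n ++ [(cl[n], sl[n])] := by
      rw [List.take_add_one, List.getElem?_eq_getElem hzn]
      simp [List.getElem_zip]
    rw [hz]
    simp only [List.foldl_cons, List.foldl_nil, pvStepA,
      PySem.List.pyGet?_natCast, List.getElem?_eq_getElem hcn, List.getElem?_eq_getElem hsn,
      List.flatMap_append, List.flatMap_cons, List.flatMap_nil, List.append_nil, pvF]
    by_cases he : cl[n] == sl[n]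
    · simp [he]
    · simp only [he, Bool.false_eq_true, if_false]
      split_ifs <;> simp

-- counts of the two labels in the flattened label list, and that only those labels occur
theorem pv_counts (sl : List Char) :
    ∀ l : List (Char × Char), (∀ p ∈ l, p.2 ∈ sl) →
      (l.flatMap (pvF sl)).count "Fermi" = l.countP (fun p => p.1 == p.2)
      ∧ (l.flatMap (pvF sl)).count "Fermi" + (l.flatMap (pvF sl)).count "Pico"
          = l.countP (fun p => decide (p.1 ∈ sl))
      ∧ ∀ x ∈ l.flatMap (pvF sl), x = "Fermi" ∨ x = "Pico" := by
  intro l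
  induction l with
  | nil => intro _; simp
  | cons p t ih =>
    intro h
    obtain ⟨h1, h2, h3⟩ := ih (fun q hq => h q (List.mem_cons_of_mem _ hq))
    have hp2 : p.2 ∈ sl := h p (List.mem_cons_self ..)
    have c1 : (["Fermi"] : List String).count "Fermi" = 1 := by decide
    have c2 : (["Fermi"] : List String).count "Pico" = 0 := by decide
    have c3 : (["Pico"] : List String).count "Fermi" = 0 := by decide
    have c4 : (["Pico"] : List String).count "Pico" = 1 := by decide
    have hM : ∀ x ∈ (p :: t).flatMap (pvF sl), x = "Fermi" ∨ x = "Pico" := by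
      intro x hx
      rw [List.flatMap_cons, List.mem_append] at hx
      rcases hx with hx | hx
      · unfold pvF at hx
        split_ifs at hx <;> simp at hx <;> simp [hx]
      · exact h3 x hx
    by_cases he : p.1 == p.2
    · have hmm : p.1 ∈ sl := by
        have hq : p.1 = p.2 := by simpa using he
        simpa [hq] using hp2
      refine ⟨?_, ?_, hM⟩
      · simp [pvF, he, h1]
      · simp [pvF, he, hmm]
        omega
    · by_cases hmm : p.1 ∈ sl
      · refine ⟨?_, ?_, hM⟩
        · simp [pvF, he, hmm, h1]
        · simp [pvF, he, hmm]
          omega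
      · refine ⟨?_, ?_, hM⟩
        · simp [pvF, he, hmm, h1]
        · simp [pvF, he, hmm]
          omega

theorem pv_len_count (l : List String) (h : ∀ x ∈ l, x = "Fermi" ∨ x = "Pico") :
    l.length = l.count "Fermi" + l.count "Pico" := by
  induction l with
  | nil => rfl
  | cons x t ih =>
    have hx := h x (List.mem_cons_self ..)
    have ht := ih (fun y hy => h y (List.mem_cons_of_mem _ hy))
    rcases hx with hx | hx <;> subst hx <;> simp [ht] <;> omega

theorem pv_canon_perm (l : List String) (h : ∀ x ∈ l, x = "Fermi" ∨ x = "Pico") :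
    (List.replicate (l.count "Fermi") "Fermi" ++ List.replicate (l.count "Pico") "Pico").Perm l := by
  induction l with
  | nil => simp
  | cons x t ih =>
    have ht := ih (fun y hy => h y (List.mem_cons_of_mem _ hy))
    rcases h x (List.mem_cons_self ..) with hx | hx <;> subst hx
    · have e1 : List.count "Fermi" ("Fermi" :: t) = t.count "Fermi" + 1 := by simp
      have e2 : List.count "Pico" ("Fermi" :: t) = t.count "Pico" := by simp
      rw [e1, e2, List.replicate_succ, List.cons_append]
      exact ht.cons _
    · have e1 : List.count "Fermi" ("Pico" :: t) = t.count "Fermi" := by simp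
      have e2 : List.count "Pico" ("Pico" :: t) = t.count "Pico" + 1 := by simp
      rw [e1, e2, List.replicate_succ]
      exact List.Perm.trans List.perm_middle (ht.cons _)

theorem pv_canon_pairwise (f p : Nat) :
    (List.replicate f "Fermi" ++ List.replicate p "Pico").Pairwise (fun a b : String => a ≤ b) := by
  apply List.pairwise_append.2
  refine ⟨List.pairwise_replicate.2 (Or.inr le_rfl), List.pairwise_replicate.2 (Or.inr le_rfl), ?_⟩
  intro a ha b hb
  rw [List.eq_of_mem_replicate ha, List.eq_of_mem_replicate hb]
  exact pv_le_FP

theorem pv_sorted_canon (l : List String) (h : ∀ x ∈ l, x = "Fermi" ∨ x = "Pico") :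
    PySem.List.sorted l (fun x => x) false
      = List.replicate (l.count "Fermi") "Fermi" ++ List.replicate (l.count "Pico") "Pico" :=
  PySem.List.sorted_id_eq_of_perm_of_pairwise _ _ (pv_canon_perm l h) (pv_canon_pairwise _ _)

-- ===== VERDICT (by name: the statement is the Claim_ definition above) =====
theorem obtenerPista_spec : Claim_equal_obtenerPista := by
  intro c s _ hpre
  unfold Spec_obtenerPista obtenerPista obtenerPista_alt
  by_cases he : c == s
  · simp [he]
  · simp only [he, if_false, Bool.false_eq_true]
    have hne : ¬ c = s := by simpa using he
    have hle : c.toList.length ≤ s.toList.length := by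
      rcases hpre with h | h
      · exact absurd h hne
      · exact h
    set cl := c.toList
    set sl := s.toList
    set z := cl.zip sl with hzdef
    have hzl : z.length = cl.length := by rw [hzdef, List.length_zip]; omega
    have hflat : (PySem.List.pyRange 0 (cl.length : Int) 1).foldl (pvStepA cl sl) []
        = z.flatMap (pvF sl) := by
      have := pv_flat cl sl cl.length [] le_rfl hle
      rwa [List.take_of_length_le (by rw [List.length_zip]; omega), List.nil_append] at this
    have hmem : ∀ p ∈ z, p.2 ∈ sl := fun p hp => (List.of_mem_zip hp).2
    obtain ⟨hF, hFP, hlab⟩ := pv_counts sl z hmem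
    set pista := z.flatMap (pvF sl) with hpista
    have hsum1 : ((cl.zip sl).map (fun p => if p.1 == p.2 then (1 : Int) else 0)).sum
        = ((z.countP (fun p => p.1 == p.2) : Nat) : Int) := by
      rw [← hzdef]; exact PySem.List.sum_map_ite_one_zero _ _
    have hsum2 : (cl.map (fun a => if sl.contains a then (1 : Int) else 0)).sum
        = ((z.countP (fun p => decide (p.1 ∈ sl)) : Nat) : Int) := by
      rw [PySem.List.sum_map_ite_one_zero]
      congr 1
      rw [← List.map_fst_zip (l₁ := cl) (l₂ := sl) hle, List.countP_map, ← hzdef]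
      exact List.countP_congr (by intro p _; simp)
    rw [hflat, hsum1, hsum2]
    have hlen := pv_len_count pista hlab
    by_cases h0 : z.countP (fun p => decide (p.1 ∈ sl)) = 0
    · have hl0 : pista.length = 0 := by rw [hlen, hFP]; exact h0
      simp [hl0, h0]
    · have hne0 : pista.length ≠ 0 := by rw [hlen, hFP]; exact h0
      have hA : (pista.length == 0) = false := by
        rw [beq_eq_false_iff_ne]; exact hne0
      have hB : (((z.countP (fun p => decide (p.1 ∈ sl)) : Nat) : Int) == 0) = false := by
        rw [beq_eq_false_iff_ne]
        exact_mod_cast h0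
      rw [hA, hB]
      simp only [Bool.false_eq_true, if_false]
      have e1 : ((z.countP (fun p => p.1 == p.2) : Nat) : Int).toNat = pista.count "Fermi" := by
        omega
      have e2 : (((z.countP (fun p => decide (p.1 ∈ sl)) : Nat) : Int)
          - ((z.countP (fun p => p.1 == p.2) : Nat) : Int)).toNat = pista.count "Pico" := by
        omega
      rw [pv_sorted_canon pista hlab, PySem.List.pyRepeat_singleton, PySem.List.pyRepeat_singleton,
        e1, e2]
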